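-- pv_equiv track=rewrite | github.com/Rizwanabid-23/object-oriented-programming | OOP lab/week4/controller.py | get_ID
-- ===== SOURCE A (Python) =====
-- def get_ID(dataTocheck, postion):
--     idx = 0
--     commaFound = 0
--     word = ""
--     while idx < len(dataTocheck):
--         c = dataTocheck[idx]
--         if c == ',':
--             commaFound += 1
--         elif (commaFound == postion):
--             word = word + c
--         idx += 1
--     return word
-- ===== SOURCE B (Python) =====
-- def get_ID(dataTocheck, postion):
--     parts = dataTocheck.split(',')
--     return parts[postion] if 0 <= postion < len(parts) else ''
-- ===== Notes on version B (the rewrite author's own statement) =====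
-- stated objective: simpler
-- what changed: Replaces the char-by-char scan with a comma counter and conditional accumulation by splitting the string into all fields once and selecting the field with a bounds-guarded index (returning '' out of range, as A does).
import Mathlib
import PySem

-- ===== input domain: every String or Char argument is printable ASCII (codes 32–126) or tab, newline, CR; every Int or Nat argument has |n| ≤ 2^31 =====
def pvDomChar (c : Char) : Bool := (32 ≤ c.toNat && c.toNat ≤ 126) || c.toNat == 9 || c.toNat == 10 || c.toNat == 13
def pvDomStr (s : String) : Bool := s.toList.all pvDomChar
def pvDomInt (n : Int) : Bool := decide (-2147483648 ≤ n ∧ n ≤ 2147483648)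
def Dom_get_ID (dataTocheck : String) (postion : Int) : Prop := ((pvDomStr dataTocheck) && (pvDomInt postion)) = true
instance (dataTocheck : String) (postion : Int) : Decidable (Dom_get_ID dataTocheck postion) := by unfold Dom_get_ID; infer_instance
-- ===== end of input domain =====

-- B builds all comma-separated fields once and selects with a guarded index; A scans char-by-char
-- counting commas and accumulating the chosen field. Equivalence of return values is proved below.

-- ===== PORT A =====
-- the while loop of A: state (commaFound, word), scanning the remaining characters
def getIDGo (cs : List Char) (postion : Int) (commaFound : Int) (word : List Char) : List Char :=
  match cs with
  | [] => word
  | c :: rest =>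
      if c = ',' then getIDGo rest postion (commaFound + 1) word
      else if commaFound = postion then getIDGo rest postion commaFound (word ++ [c])
      else getIDGo rest postion commaFound word

def get_ID (dataTocheck : String) (postion : Int) : String :=
  String.ofList (getIDGo dataTocheck.toList postion 0 [])

-- ===== PORT B =====
def get_ID_alt (dataTocheck : String) (postion : Int) : String :=
  let parts := dataTocheck.toList.splitOn ','   -- dataTocheck.split(',')
  if 0 ≤ postion ∧ postion < (parts.length : Int) then String.ofList (parts.getD postion.toNat [])
  else ""

-- ===== PRECONDITION & SPEC =====
def Spec_get_ID (dataTocheck : String) (postion : Int) (out : String) : Prop := out = get_ID_alt dataTocheck postion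
instance (dataTocheck : String) (postion : Int) (out : String) : Decidable (Spec_get_ID dataTocheck postion out) := by unfold Spec_get_ID; infer_instance

-- ===== CLAIM (what is proved, stated in full; the proofs are below) =====
def Claim_equal_get_ID : Prop := ∀ (dataTocheck : String) (postion : Int), Dom_get_ID dataTocheck postion → Spec_get_ID dataTocheck postion (get_ID dataTocheck postion)

-- ===== LEMMAS AND PROOFS =====

theorem splitOn_comma_ne_nil (cs : List Char) : cs.splitOn ',' ≠ [] := by
  simp [List.splitOn]
  exact List.splitOnP_ne_nil _ _

-- the field that A's loop appends to `word`, expressed through splitOn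
def fieldSel (cs : List Char) (k : Int) : List Char :=
  if 0 ≤ k ∧ k < ((cs.splitOn ',').length : Int) then (cs.splitOn ',').getD k.toNat [] else []

theorem splitOn_comma_cons (c : Char) (cs : List Char) :
    (c :: cs).splitOn ',' =
      if c = ',' then [] :: cs.splitOn ',' else (cs.splitOn ',').modifyHead (List.cons c) := by
  simp only [List.splitOn, List.splitOnP_cons]
  by_cases h : c = ',' <;> simp [h]

theorem fieldSel_comma (cs : List Char) (k : Int) :
    fieldSel (',' :: cs) k = fieldSel cs (k - 1) := by
  unfold fieldSel
  rw [splitOn_comma_cons, if_pos rfl]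
  by_cases hneg : 0 ≤ k
  · by_cases hz : k = 0
    · subst hz
      rw [if_pos ⟨le_refl 0, by simp only [List.length_cons]; push_cast; omega⟩,
        if_neg (by omega)]
      simp
    · have ht : k.toNat = (k - 1).toNat + 1 := by omega
      by_cases hlt : k - 1 < ((cs.splitOn ',').length : Int)
      · rw [if_pos ⟨hneg, by simp only [List.length_cons]; push_cast; omega⟩,
          if_pos ⟨by omega, hlt⟩, ht]
        simp
      · rw [if_neg (by simp only [List.length_cons]; push_cast; omega), if_neg (by omega)]
  · rw [if_neg (by omega), if_neg (by omega)]

theorem fieldSel_head (c : Char) (hc : c ≠ ',') (cs : List Char) :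
    fieldSel (c :: cs) 0 = c :: fieldSel cs 0 := by
  obtain ⟨hd, tl, hq⟩ : ∃ hd tl, cs.splitOn ',' = hd :: tl := by
    rcases h : cs.splitOn ',' with _ | ⟨hd, tl⟩
    · exact absurd h (splitOn_comma_ne_nil cs)
    · exact ⟨hd, tl, rfl⟩
  unfold fieldSel
  rw [splitOn_comma_cons, if_neg hc, hq, List.modifyHead_cons]
  rw [if_pos ⟨le_refl 0, by simp only [List.length_cons]; push_cast; omega⟩,
    if_pos ⟨le_refl 0, by simp only [List.length_cons]; push_cast; omega⟩]
  simp

theorem fieldSel_ne (c : Char) (hc : c ≠ ',') (cs : List Char) (k : Int) (hk : k ≠ 0) :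
    fieldSel (c :: cs) k = fieldSel cs k := by
  obtain ⟨hd, tl, hq⟩ : ∃ hd tl, cs.splitOn ',' = hd :: tl := by
    rcases h : cs.splitOn ',' with _ | ⟨hd, tl⟩
    · exact absurd h (splitOn_comma_ne_nil cs)
    · exact ⟨hd, tl, rfl⟩
  unfold fieldSel
  rw [splitOn_comma_cons, if_neg hc, hq, List.modifyHead_cons]
  by_cases h : 0 ≤ k ∧ k < (((hd :: tl).length : Nat) : Int)
  · rw [if_pos (by simpa using h), if_pos h]
    have ht : k.toNat = (k.toNat - 1) + 1 := by omega
    rw [ht]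
    simp
  · rw [if_neg (by simpa using h), if_neg h]

theorem getIDGo_eq_fieldSel (cs : List Char) (postion commaFound : Int) (word : List Char) :
    getIDGo cs postion commaFound word = word ++ fieldSel cs (postion - commaFound) := by
  induction cs generalizing commaFound word with
  | nil =>
      simp only [getIDGo, fieldSel, List.splitOn_nil, List.length_cons, List.length_nil]
      split_ifs with h
      · have : (postion - commaFound).toNat = 0 := by push_cast at h; omega
        simp [this]
      · simp
  | cons c rest ih =>
      simp only [getIDGo]
      split_ifs with hc hp
      · subst hc
        rw [ih, fieldSel_comma]
        ring_nf
      · subst hp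
        rw [ih, sub_self, fieldSel_head c hc]
        simp
      · rw [ih, fieldSel_ne c hc rest _ (by omega)]

-- ===== VERDICT (by name: the statement is the Claim_ definition above) =====
theorem get_ID_spec : Claim_equal_get_ID := by
  intro s p _
  unfold Spec_get_ID get_ID get_ID_alt
  rw [getIDGo_eq_fieldSel]
  simp only [fieldSel, List.nil_append, sub_zero]
  split_ifs with h
  · rfl
  · rfl
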